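-- pv_equiv track=rewrite | github.com/Processuales/adaptive-systematic-trading | run_step2_step3_final.py | safe_tag
-- ===== SOURCE A (Python) =====
-- def safe_tag(text: str, fallback: str = "pair") -> str:
--     s = str(text or "").strip().lower()
--     if not s:
--         return fallback
--     out = []
--     for ch in s:
--         if ch.isalnum():
--             out.append(ch)
--         elif ch in ("-", "_"):
--             out.append("_")
--         else:
--             out.append("_")
--     cleaned = "".join(out).strip("_")
--     while "__" in cleaned:
--         cleaned = cleaned.replace("__", "_")
--     return cleaned or fallback
-- ===== SOURCE B (Python) =====
-- def safe_tag(text: str, fallback: str = "pair") -> str: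
--     s = str(text or "").strip().lower()
--     out = []
--     pending = False
--     for ch in s:
--         if ch.isalnum():
--             if pending and out:
--                 out.append("_")
--             out.append(ch)
--             pending = False
--         else:
--             pending = True
--     return "".join(out) or fallback
-- ===== Notes on version B (the rewrite author's own statement) =====
-- stated objective: simpler
-- what changed: B builds the tag in one pass, emitting a single underscore lazily only before the next alphanumeric character, instead of A's build-then-rescan loop that repeatedly replaces double underscores until none remain and then strips edge underscores.
import Mathlib
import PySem

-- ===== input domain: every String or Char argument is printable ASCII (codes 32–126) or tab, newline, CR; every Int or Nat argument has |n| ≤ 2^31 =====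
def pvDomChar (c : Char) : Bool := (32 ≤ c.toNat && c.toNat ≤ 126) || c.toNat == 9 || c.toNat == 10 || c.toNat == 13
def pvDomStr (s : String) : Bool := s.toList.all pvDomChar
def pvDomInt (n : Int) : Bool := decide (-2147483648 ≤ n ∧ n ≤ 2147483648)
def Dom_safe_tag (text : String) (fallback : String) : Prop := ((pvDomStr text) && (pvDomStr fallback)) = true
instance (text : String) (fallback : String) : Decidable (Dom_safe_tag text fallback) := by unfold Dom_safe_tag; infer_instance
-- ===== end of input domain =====

-- B replaces A's build-then-rescan underscore collapsing (`while "__" in cleaned: replace` plus strip('_'))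
-- by a single pass that emits '_' lazily only before the next alphanumeric character; objective: simpler.

-- ===== PORT A =====
-- pvRep cs = one left-to-right pass of cleaned.replace("__","_"); with pvRep_cons_ne/pvGo_eq/pvReplace_len_lt it
-- justifies termination of the `while "__" in cleaned` loop (pvCollapse) below.
def pvRep : List Char → List Char
  | '_' :: '_' :: t => '_' :: pvRep t
  | c :: t => c :: pvRep t
  | [] => []

theorem pvRep_len_le (cs : List Char) : (pvRep cs).length ≤ cs.length := by
  fun_induction pvRep cs <;> simp_all <;> omega

theorem pvRep_cons_ne (c : Char) (t : List Char) (h : ¬(c = '_' ∧ t.head? = some '_')) :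
    pvRep (c :: t) = c :: pvRep t := by
  rw [pvRep.eq_def]; split
  · rename_i heq; injection heq with h1 h2
    exact absurd ⟨h1, by rw [h2]; rfl⟩ h
  · rename_i heq; injection heq with h1 h2; subst h1; subst h2; rfl
  · rename_i heq; simp at heq

theorem pvGo_eq (fuel : Nat) (l acc : List Char) (h : l.length ≤ fuel) :
    PySem.Chars.replace.go ['_','_'] ['_'] fuel l acc = acc.reverse ++ pvRep l := by
  induction fuel generalizing l acc with
  | zero =>
    rcases l with _ | ⟨c, t⟩
    · simp [PySem.Chars.replace.go, pvRep]
    · simp at h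
  | succ n ih =>
    rcases l with _ | ⟨c, t⟩
    · simp [PySem.Chars.replace.go, pvRep]
    · rw [PySem.Chars.replace.go]
      by_cases hc : c = '_'
      · subst hc
        rcases t with _ | ⟨c2, t2⟩
        · have hp : List.isPrefixOf ['_','_'] ['_'] = false := by decide
          simp only [hp]
          rw [ih [] _ (by simp)]
          simp [pvRep]
        · by_cases hc2 : c2 = '_'
          · subst hc2
            have hp : List.isPrefixOf ['_','_'] ('_'::'_'::t2) = true := by
              simp [List.isPrefixOf]
            simp only [hp, if_true]
            rw [ih _ _ (by simp at h ⊢; omega)]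
            simp [pvRep]
          · have hp : List.isPrefixOf ['_','_'] ('_'::c2::t2) = false := by
              simp [List.isPrefixOf, Ne.symm hc2]
            simp only [hp]
            rw [ih (c2::t2) ('_'::acc) (by simp at h ⊢; omega)]
            rw [pvRep_cons_ne '_' (c2::t2) (by simp [hc2])]
            simp
      · have hp : List.isPrefixOf ['_','_'] (c::t) = false := by
          simp [List.isPrefixOf, Ne.symm hc]
        simp only [hp]
        rw [ih t (c::acc) (by simp at h ⊢; omega)]
        rw [pvRep_cons_ne c t (by simp [hc])]
        simp

theorem pvReplace_eq_rep (cs : List Char) :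
    PySem.Chars.replace cs ['_','_'] ['_'] = pvRep cs := by
  rw [PySem.Chars.replace]
  simp only [List.isEmpty_iff, reduceCtorEq, if_false]
  rw [pvGo_eq cs.length cs [] (le_refl _)]
  simp

theorem pvRep_len_lt (cs : List Char) (h : ['_','_'] <:+: cs) :
    (pvRep cs).length < cs.length := by
  induction cs with
  | nil => simp at h
  | cons c t ih =>
    by_cases hdd : c = '_' ∧ t.head? = some '_'
    · obtain ⟨hc, ht⟩ := hdd
      rcases t with _ | ⟨c2, t2⟩
      · simp at ht
      · simp at ht; subst hc; subst ht
        rw [show pvRep ('_'::'_'::t2) = '_' :: pvRep t2 from by simp [pvRep]]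
        have := pvRep_len_le t2
        simp; omega
    · have ht : ['_','_'] <:+: t := by
        rcases (List.infix_cons_iff).1 h with hpre | hinf
        · obtain ⟨r, hr⟩ := hpre
          exfalso; apply hdd
          have h1 : c = '_' ∧ t = '_' :: r := by
            injection hr with ha hb; exact ⟨ha.symm, hb.symm⟩
          exact ⟨h1.1, by rw [h1.2]; rfl⟩
        · exact hinf
      rw [pvRep_cons_ne c t hdd]
      have := ih ht
      simp; omega

theorem pvReplace_len_lt (cs : List Char) (h : PySem.Chars.isIn ['_','_'] cs = true) :
    (PySem.Chars.replace cs ['_','_'] ['_']).length < cs.length := by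
  rw [pvReplace_eq_rep]
  exact pvRep_len_lt cs ((PySem.Chars.isIn_iff_infix _ _).1 h)

-- the `while "__" in cleaned: cleaned = cleaned.replace("__","_")` loop of A
def pvCollapse (cleaned : List Char) : List Char :=
  if h : PySem.Chars.isIn ['_','_'] cleaned then
    pvCollapse (PySem.Chars.replace cleaned ['_','_'] ['_'])
  else cleaned
termination_by cleaned.length
decreasing_by exact pvReplace_len_lt _ h

def safe_tag (text : String) (fallback : String) : String :=
  -- s = str(text or "").strip().lower()  (for a str argument, `str(text or "")` is text itself)
  let s := PySem.Chars.lower (PySem.Chars.strip text.toList)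
  if s = [] then fallback
  else
    let out := s.foldl (fun acc ch =>
      if PySem.Chars.isalnum ch then acc ++ [ch]
      else if ch = '-' ∨ ch = '_' then acc ++ ['_']
      else acc ++ ['_']) []
    let cleaned := PySem.Chars.stripChars out ['_']
    let cleaned2 := pvCollapse cleaned
    if cleaned2 = [] then fallback else String.ofList cleaned2

-- ===== PORT B =====
def safe_tag_alt (text : String) (fallback : String) : String :=
  let s := PySem.Chars.lower (PySem.Chars.strip text.toList)
  let st := s.foldl (fun (st : List Char × Bool) ch =>
      if PySem.Chars.isalnum ch then
        (if st.2 && !st.1.isEmpty then st.1 ++ ['_', ch] else st.1 ++ [ch], false)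
      else (st.1, true)) ([], false)
  if st.1 = [] then fallback else String.ofList st.1

-- ===== PRECONDITION & SPEC =====
def Spec_safe_tag (text : String) (fallback : String) (out : String) : Prop := out = safe_tag_alt text fallback
instance (text : String) (fallback : String) (out : String) : Decidable (Spec_safe_tag text fallback out) := by unfold Spec_safe_tag; infer_instance

-- ===== CLAIM (what is proved, stated in full; the proofs are below) =====
def Claim_equal_safe_tag : Prop := ∀ (text : String) (fallback : String), Dom_safe_tag text fallback → Spec_safe_tag text fallback (safe_tag text fallback)

-- ===== LEMMAS AND PROOFS =====

-- canonical collapsed form: drop every '_' that is immediately followed by another '_'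
def pvSquash : List Char → List Char
  | [] => []
  | [c] => [c]
  | a :: b :: t => if a = '_' ∧ b = '_' then pvSquash (b :: t) else a :: pvSquash (b :: t)

theorem pvSquash_cons₂ (a b : Char) (t : List Char) :
    pvSquash (a :: b :: t) = if a = '_' ∧ b = '_' then pvSquash (b :: t) else a :: pvSquash (b :: t) := by
  rw [pvSquash]

theorem pvSquash_rep_cons_aux (n : Nat) : ∀ (t : List Char) (c : Char), t.length ≤ n →
    pvSquash (c :: pvRep t) = pvSquash (c :: t) := by
  induction n with
  | zero =>
    intro t c h
    rcases t with _ | ⟨b, u⟩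
    · rfl
    · simp at h
  | succ n ih =>
    intro t c h
    rcases t with _ | ⟨b, u⟩
    · rfl
    · by_cases hdd : b = '_' ∧ u.head? = some '_'
      · obtain ⟨hb, hu⟩ := hdd
        subst hb
        rcases u with _ | ⟨b2, u2⟩
        · simp at hu
        · simp at hu; subst hu
          rw [show pvRep ('_'::'_'::u2) = '_' :: pvRep u2 from by simp [pvRep]]
          rw [pvSquash_cons₂ c '_' (pvRep u2), pvSquash_cons₂ c '_' ('_'::u2),
              pvSquash_cons₂ '_' '_' u2]
          rw [ih u2 '_' (by simp at h; omega)]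
          split_ifs <;> simp_all
      · rw [pvRep_cons_ne b u hdd]
        rw [pvSquash_cons₂ c b (pvRep u), pvSquash_cons₂ c b u]
        rw [ih u b (by simp at h; omega)]

theorem pvSquash_rep (cs : List Char) : pvSquash (pvRep cs) = pvSquash cs := by
  rcases cs with _ | ⟨b, u⟩
  · rfl
  · by_cases hdd : b = '_' ∧ u.head? = some '_'
    · obtain ⟨hb, hu⟩ := hdd
      subst hb
      rcases u with _ | ⟨b2, u2⟩
      · simp at hu
      · simp at hu; subst hu
        rw [show pvRep ('_'::'_'::u2) = '_' :: pvRep u2 from by simp [pvRep]]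
        rw [pvSquash_rep_cons_aux u2.length u2 '_' (le_refl _)]
        rw [pvSquash_cons₂ '_' '_' u2]
        simp
    · rw [pvRep_cons_ne b u hdd]
      exact pvSquash_rep_cons_aux u.length u b (le_refl _)

theorem pvSquash_of_no_dd (cs : List Char) (h : ¬ (['_','_'] <:+: cs)) : pvSquash cs = cs := by
  fun_induction pvSquash cs with
  | case1 => rfl
  | case2 c => rfl
  | case3 a b t hab ih =>
    exfalso
    apply h
    have hpre : ['_','_'] <+: a :: b :: t := ⟨t, by rw [hab.1, hab.2]; rfl⟩
    exact hpre.isInfix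
  | case4 a b t hab ih =>
    rw [ih (fun hinf => h (hinf.trans ((List.suffix_cons a (b::t)).isInfix)))]

theorem pvCollapse_eq_squash_aux (n : Nat) : ∀ (cs : List Char), cs.length ≤ n →
    pvCollapse cs = pvSquash cs := by
  induction n with
  | zero =>
    intro cs h
    rcases cs with _ | ⟨c, t⟩
    · rw [pvCollapse, dif_neg (by decide)]; rfl
    · simp at h
  | succ n ih =>
    intro cs h
    by_cases hin : PySem.Chars.isIn ['_','_'] cs = true
    · rw [pvCollapse, dif_pos hin, pvReplace_eq_rep]
      rw [ih (pvRep cs) (by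
        have := pvRep_len_lt cs ((PySem.Chars.isIn_iff_infix _ _).1 hin)
        omega)]
      exact pvSquash_rep cs
    · rw [pvCollapse, dif_neg hin]
      exact (pvSquash_of_no_dd cs
        (fun hinf => hin ((PySem.Chars.isIn_iff_infix _ _).2 hinf))).symm

theorem pvCollapse_eq_squash (cs : List Char) : pvCollapse cs = pvSquash cs :=
  pvCollapse_eq_squash_aux cs.length cs (le_refl _)

-- B-side abbreviations (proof-side only)
def pvU : Char → Bool := fun c => decide (c = '_')
def pvF (c : Char) : Char := if PySem.Chars.isalnum c then c else '_'
def pvPend (p : List Char) : Bool :=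
  match p.getLast? with
  | none => false
  | some c => !PySem.Chars.isalnum c

theorem pvStrip_eq (x : List Char) :
    PySem.Chars.stripChars x ['_'] = ((x.dropWhile pvU).reverse.dropWhile pvU).reverse := by
  have hp : (fun c : Char => (['_'] : List Char).contains c) = pvU := by
    funext c; simp [pvU]
  simp only [PySem.Chars.stripChars, hp]

theorem pvAlnum_ne (c : Char) (h : PySem.Chars.isalnum c = true) : c ≠ '_' := by
  rintro rfl
  have : PySem.Chars.isalnum '_' = false := by decide
  rw [this] at h; exact Bool.false_ne_true h

theorem pvSquash_ne_nil (cs : List Char) (h : cs ≠ []) : pvSquash cs ≠ [] := by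
  fun_induction pvSquash cs with
  | case1 => exact absurd rfl h
  | case2 c => simp
  | case3 a b t hab ih => exact ih (by simp)
  | case4 a b t hab ih => simp

theorem pvSquash_append (X : List Char) (c : Char) (hc : c ≠ '_') :
    pvSquash (X ++ [c]) = pvSquash X ++ [c] := by
  induction X with
  | nil => rfl
  | cons a X' ih =>
    rcases X' with _ | ⟨b, X''⟩
    · simp only [List.cons_append, List.nil_append]
      rw [pvSquash_cons₂, if_neg (by rintro ⟨_, rfl⟩; exact hc rfl)]
      rfl
    · simp only [List.cons_append] at ih ⊢
      rw [pvSquash_cons₂, pvSquash_cons₂ a b X'']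
      rw [ih]
      split_ifs <;> simp

theorem pvSquash_repl (k : Nat) (c : Char) (hc : c ≠ '_') :
    pvSquash (List.replicate (k + 1) '_' ++ [c]) = ['_', c] := by
  induction k with
  | zero =>
    show pvSquash ['_', c] = ['_', c]
    rw [pvSquash_cons₂, if_neg (by rintro ⟨_, rfl⟩; exact hc rfl)]
    rfl
  | succ k ih =>
    rw [List.replicate_succ, List.replicate_succ]
    simp only [List.cons_append]
    rw [pvSquash_cons₂, if_pos ⟨rfl, rfl⟩]
    rw [List.replicate_succ] at ih
    simpa using ih

theorem pvSquash_mid (Z : List Char) (k : Nat) (c : Char) (hc : c ≠ '_')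
    (hZ : Z.getLast? ≠ some '_') :
    pvSquash (Z ++ List.replicate (k + 1) '_' ++ [c]) = pvSquash Z ++ ['_', c] := by
  induction Z with
  | nil => simpa using pvSquash_repl k c hc
  | cons a Z' ih =>
    rcases Z' with _ | ⟨b, Z''⟩
    · have ha : a ≠ '_' := by simpa using hZ
      rw [List.replicate_succ]
      simp only [List.cons_append, List.nil_append, List.append_assoc]
      rw [pvSquash_cons₂, if_neg (by rintro ⟨rfl, _⟩; exact ha rfl)]
      have h2 : pvSquash ('_' :: (List.replicate k '_' ++ [c])) = ['_', c] := by
        have := pvSquash_repl k c hc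
        rw [List.replicate_succ] at this
        simpa using this
      rw [h2]
      rfl
    · have hZ' : (b :: Z'').getLast? ≠ some '_' := by
        rwa [List.getLast?_cons_cons] at hZ
      simp only [List.cons_append] at ih ⊢
      rw [pvSquash_cons₂]
      rw [show pvSquash (a :: b :: Z'') = if a = '_' ∧ b = '_' then pvSquash (b :: Z'') else a :: pvSquash (b :: Z'') from pvSquash_cons₂ a b Z'']
      rw [ih hZ']
      split_ifs <;> simp

theorem pvDropWhile_head (p : Char → Bool) (l : List Char) (d : Char) (r : List Char)
    (h : l.dropWhile p = d :: r) : p d = false := by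
  induction l with
  | nil => simp at h
  | cons a t ih =>
    rw [List.dropWhile_cons] at h
    by_cases pa : p a = true
    · rw [if_pos pa] at h; exact ih h
    · rw [if_neg pa] at h
      injection h with h1 _
      subst h1
      exact Bool.not_eq_true _ ▸ (by simpa using pa)

-- getLast? of the nonempty result of dropWhile is the original getLast?
theorem pvDrop_getLast? (p : Char → Bool) (M : List Char) (h : M.dropWhile p ≠ []) :
    (M.dropWhile p).getLast? = M.getLast? := by
  obtain ⟨Z, hZ⟩ := List.dropWhile_suffix p (l := M)
  conv_rhs => rw [← hZ]
  rw [List.getLast?_append]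
  rcases he : (M.dropWhile p).getLast? with _ | d
  · exact absurd (List.getLast?_eq_none_iff.1 he) h
  · rfl

-- (1) a trailing '_' is stripped:  strip(M ++ "_") = strip M
theorem pvStrip_append_u (M : List Char) :
    PySem.Chars.stripChars (M ++ ['_']) ['_'] = PySem.Chars.stripChars M ['_'] := by
  rw [pvStrip_eq, pvStrip_eq]
  rw [List.dropWhile_append]
  by_cases he : (M.dropWhile pvU).isEmpty
  · rw [if_pos he]
    rw [List.isEmpty_iff] at he
    rw [he]
    simp [pvU]
  · rw [if_neg he]
    simp only [List.reverse_append, List.reverse_cons, List.reverse_nil, List.nil_append,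
      List.singleton_append]
    rw [List.dropWhile_cons, if_pos (by simp [pvU])]

-- (2) appending a non-'_' when M does not end in '_':  strip(M ++ [c]) = strip M ++ [c]
theorem pvStrip_append_c (M : List Char) (c : Char) (hc : c ≠ '_')
    (hM : M.getLast? ≠ some '_') :
    PySem.Chars.stripChars (M ++ [c]) ['_'] = PySem.Chars.stripChars M ['_'] ++ [c] := by
  rw [pvStrip_eq, pvStrip_eq]
  rw [List.dropWhile_append]
  by_cases he : (M.dropWhile pvU).isEmpty
  · rw [if_pos he]
    rw [List.isEmpty_iff, List.dropWhile_eq_nil_iff] at he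
    have hMnil : M = [] := by
      rcases hl : M.getLast? with _ | d
      · exact List.getLast?_eq_none_iff.1 hl
      · exfalso
        have hd : d ∈ M := List.mem_of_getLast? hl
        have : pvU d = true := he d hd
        simp only [pvU, decide_eq_true_eq] at this
        exact hM (by rw [hl, this])
    subst hMnil
    simp [pvU, hc]
  · rw [if_neg he]
    rw [List.isEmpty_iff] at he
    have hlast : (M.dropWhile pvU).getLast? = M.getLast? := pvDrop_getLast? pvU M he
    simp only [List.reverse_append, List.reverse_cons, List.reverse_nil, List.nil_append,
      List.singleton_append]
    rw [List.dropWhile_cons, if_neg (by simp [pvU, hc])]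
    have hdw : (M.dropWhile pvU).reverse.dropWhile pvU = (M.dropWhile pvU).reverse := by
      rcases hr : (M.dropWhile pvU).reverse with _ | ⟨d, r⟩
      · rfl
      · rw [List.dropWhile_cons, if_neg ?_]
        have hd : (M.dropWhile pvU).getLast? = some d := by
          rw [← List.head?_reverse, hr]; rfl
        rw [hlast] at hd
        simp only [pvU, decide_eq_true_eq]
        intro hdu
        exact hM (by rw [hd, hdu])
    rw [hdw]
    simp

-- (3) appending a non-'_' when M ends in '_'
theorem pvStrip_append_c' (M : List Char) (c : Char) (hc : c ≠ '_')
    (hM : M.getLast? = some '_') :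
    pvSquash (PySem.Chars.stripChars (M ++ [c]) ['_'])
      = if pvSquash (PySem.Chars.stripChars M ['_']) = [] then [c]
        else pvSquash (PySem.Chars.stripChars M ['_']) ++ ['_', c] := by
  rw [pvStrip_eq, pvStrip_eq]
  rw [List.dropWhile_append]
  by_cases he : (M.dropWhile pvU).isEmpty
  · rw [if_pos he]
    rw [List.isEmpty_iff] at he
    rw [he]
    simp [pvU, hc, pvSquash]
  · rw [if_neg he]
    rw [List.isEmpty_iff] at he
    set Y := M.dropWhile pvU with hY
    have hlast : Y.getLast? = some '_' := by rw [hY, pvDrop_getLast? pvU M he, hM]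
    -- decompose Y from the right into Z ++ replicate k '_'
    set T := Y.reverse.takeWhile pvU with hT
    set D := Y.reverse.dropWhile pvU with hD
    have hYrev : Y.reverse = T ++ D := (List.takeWhile_append_dropWhile).symm
    have hYdec : Y = D.reverse ++ T.reverse := by
      rw [← List.reverse_reverse Y, hYrev, List.reverse_append]
    have hTrep : T.reverse = List.replicate T.length '_' := by
      rw [List.eq_replicate_iff]
      refine ⟨by simp, ?_⟩
      intro b hb
      rw [List.mem_reverse] at hb
      have := List.mem_takeWhile_imp hb
      simpa [pvU] using this
    have hT1 : 1 ≤ T.length := by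
      rcases hYr : Y.reverse with _ | ⟨d, r⟩
      · exfalso; exact he (by simpa using congrArg List.reverse hYr)
      · have hd : d = '_' := by
          have : Y.getLast? = some d := by rw [← List.head?_reverse, hYr]; rfl
          rw [hlast] at this; injection this with h'; exact h'.symm
        rw [hT, hYr, List.takeWhile_cons, if_pos (by simp [pvU, hd])]
        simp
    have hDlast : D.reverse.getLast? ≠ some '_' := by
      rcases hDe : D with _ | ⟨d, r⟩
      · simp
      · have hdd : Y.reverse.dropWhile pvU = d :: r := by rw [← hD]; exact hDe
        have hd : pvU d = false := pvDropWhile_head pvU Y.reverse d r hdd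
        rw [List.getLast?_reverse]
        simp only [hDe, List.head?_cons]
        simp only [pvU, decide_eq_false_iff_not] at hd
        intro heq; injection heq with h'; exact hd h'
    -- left side
    simp only [List.reverse_append, List.reverse_cons, List.reverse_nil, List.nil_append,
      List.singleton_append]
    rw [List.dropWhile_cons, if_neg (by simp [pvU, hc])]
    conv_lhs => rw [show (c :: Y.reverse).reverse = Y ++ [c] from by simp]
    obtain ⟨k', hk'⟩ : ∃ k', T.length = k' + 1 := ⟨T.length - 1, by omega⟩
    rw [hYdec, hTrep, hk']
    rw [pvSquash_mid D.reverse k' c hc hDlast]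
    -- right side: strip M = D.reverse; it is nonempty since Y starts with a non-'_' char
    rw [if_neg (pvSquash_ne_nil D.reverse (fun hDrev => by
      have hDnil : D = [] := by simpa using congrArg List.reverse hDrev
      rcases hYc : Y with _ | ⟨d0, r0⟩
      · exact he hYc
      · have hd0 : pvU d0 = false := pvDropWhile_head pvU M d0 r0 (by rw [← hY]; exact hYc)
        have hmem : d0 ∈ Y := by rw [hYc]; exact List.mem_cons_self
        rw [hYdec, hDnil] at hmem
        simp only [List.reverse_nil, List.nil_append] at hmem
        rw [hTrep] at hmem
        rw [List.eq_of_mem_replicate hmem] at hd0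
        simp [pvU] at hd0))]

theorem pvPend_iff (p : List Char) :
    pvPend p = true ↔ (p.map pvF).getLast? = some '_' := by
  unfold pvPend
  rcases h : p.getLast? with _ | d
  · simp [List.getLast?_map, h]
  · simp only [List.getLast?_map, h, Option.map_some]
    constructor
    · intro hd
      rw [Bool.not_eq_eq_eq_not, Bool.not_true] at hd
      simp [pvF, hd]
    · intro hd
      injection hd with hd
      rw [Bool.not_eq_eq_eq_not, Bool.not_true]
      by_contra hba
      rw [Bool.not_eq_false] at hba
      rw [show pvF d = d from by simp [pvF, hba]] at hd
      exact pvAlnum_ne d hba hd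

theorem pvFold_eq (p : List Char) :
    p.foldl (fun (st : List Char × Bool) ch =>
      if PySem.Chars.isalnum ch then
        (if st.2 && !st.1.isEmpty then st.1 ++ ['_', ch] else st.1 ++ [ch], false)
      else (st.1, true)) ([], false)
    = (pvSquash (PySem.Chars.stripChars (p.map pvF) ['_']), pvPend p) := by
  induction p using List.reverseRecOn with
  | nil => simp [pvPend, pvStrip_eq, pvSquash]
  | append_singleton p c ih =>
    rw [List.foldl_append, ih]
    simp only [List.foldl_cons, List.foldl_nil, List.map_append, List.map_cons, List.map_nil]
    have hpend : pvPend (p ++ [c]) = !PySem.Chars.isalnum c := by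
      unfold pvPend
      rw [List.getLast?_concat]
    by_cases hA : PySem.Chars.isalnum c
    · have hfc : pvF c = c := by simp [pvF, hA]
      have hc : c ≠ '_' := pvAlnum_ne c hA
      simp only [hA, if_true, hfc, hpend]
      by_cases hP : pvPend p = true
      · have hM : (p.map pvF).getLast? = some '_' := (pvPend_iff p).1 hP
        rw [pvStrip_append_c' (p.map pvF) c hc hM]
        simp only [hP, Bool.true_and]
        by_cases hem : pvSquash (PySem.Chars.stripChars (p.map pvF) ['_']) = []
        · simp [hem]
        · simp [hem, if_neg hem, List.isEmpty_iff]
      · have hM : (p.map pvF).getLast? ≠ some '_' := fun h => hP ((pvPend_iff p).2 h)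
        rw [pvStrip_append_c (p.map pvF) c hc hM, pvSquash_append _ c hc]
        rw [Bool.not_eq_true] at hP
        simp [hP, hA]
    · have hfc : pvF c = '_' := by simp [pvF, hA]
      simp only [hA, if_false, hfc, hpend]
      rw [pvStrip_append_u (p.map pvF)]
      simp [hA]

theorem pvAfold (s : List Char) :
    s.foldl (fun acc ch =>
      if PySem.Chars.isalnum ch then acc ++ [ch]
      else if ch = '-' ∨ ch = '_' then acc ++ ['_']
      else acc ++ ['_']) [] = s.map pvF := by
  have h : (fun (acc : List Char) ch =>
      if PySem.Chars.isalnum ch then acc ++ [ch]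
      else if ch = '-' ∨ ch = '_' then acc ++ ['_']
      else acc ++ ['_']) = fun acc ch => acc ++ [pvF ch] := by
    funext acc ch
    unfold pvF
    split_ifs <;> rfl
  rw [h, PySem.List.foldl_append_singleton_eq_map]
  simp

-- ===== VERDICT (by name: the statement is the Claim_ definition above) =====
theorem safe_tag_spec : Claim_equal_safe_tag := by
  intro text fallback _
  unfold Spec_safe_tag safe_tag safe_tag_alt
  simp only [pvFold_eq, pvAfold, pvCollapse_eq_squash]
  by_cases h : PySem.Chars.lower (PySem.Chars.strip text.toList) = []
  · simp [h, pvStrip_eq, pvSquash]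
  · simp only [if_neg h]
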